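-- pv_equiv track=rewrite | github.com/llouis0622/Algorithm_Deep_Dive | Programmers/Lv. 1/[연습문제] 햄버거 만들기.py | solution
-- ===== SOURCE A (Python) =====
-- def solution(ingredient):
--     lst = []
--     cnt = 0
--     arr = [1, 2, 3, 1]
--
--     for i in ingredient:
--         lst.append(i)
--         if lst[-4:] == arr:
--             cnt += 1
--             del lst[-4:]
--     return cnt
-- ===== SOURCE B (Python) =====
-- def solution(ingredient):
--     lst = list(ingredient)
--     cnt = 0
--     while True:
--         for i in range(len(lst) - 3):
--             if lst[i:i + 4] == [1, 2, 3, 1]: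
--                 del lst[i:i + 4]
--                 cnt += 1
--                 break
--         else:
--             return cnt
-- ===== Notes on version B (the rewrite author's own statement) =====
-- stated objective: alternative
-- what changed: A's single incremental stack pass (push each element, pop when the stack top reads [1,2,3,1]) is replaced by repeatedly scanning the whole list for the leftmost [1,2,3,1] sublist, splicing it out and restarting until no occurrence remains.
import Mathlib
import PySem

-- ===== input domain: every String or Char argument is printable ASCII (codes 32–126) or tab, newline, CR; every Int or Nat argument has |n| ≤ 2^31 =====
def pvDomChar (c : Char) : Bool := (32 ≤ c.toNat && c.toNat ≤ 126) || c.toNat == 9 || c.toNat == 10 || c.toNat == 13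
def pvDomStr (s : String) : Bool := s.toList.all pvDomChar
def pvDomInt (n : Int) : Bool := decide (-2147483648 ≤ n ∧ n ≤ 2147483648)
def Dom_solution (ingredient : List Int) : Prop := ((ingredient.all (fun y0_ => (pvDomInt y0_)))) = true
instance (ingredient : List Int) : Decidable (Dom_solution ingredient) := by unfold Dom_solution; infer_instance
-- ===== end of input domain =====

-- B replaces A's single incremental stack pass by repeated leftmost-occurrence splicing to a fixpoint
-- (alternative decomposition, not faster); A does not mutate its argument observable to the caller.

-- ===== PORT A =====
-- loop body of A: lst.append(i); if lst[-4:] == [1,2,3,1]: cnt += 1; del lst[-4:]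
def pvStepA (st : List Int × Int) (i : Int) : List Int × Int :=
  let lst := st.1 ++ [i]
  if PySem.List.slice lst (some (-4)) none = [1, 2, 3, 1] then
    (PySem.List.slice lst none (some (-4)), st.2 + 1)
  else (lst, st.2)

def solution (ingredient : List Int) : Int :=
  (ingredient.foldl pvStepA ([], 0)).2

-- ===== PORT B =====
-- B's inner `for i in range(len(lst) - 3): if lst[i:i+4] == [1,2,3,1]` scan; the nonnegative
-- slice lst[i:i+4] is exactly (lst.drop i).take 4.
def pvFind (lst : List Int) (i : Nat) : Option Nat :=
  if i + 4 ≤ lst.length then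
    if (lst.drop i).take 4 = [1, 2, 3, 1] then some i else pvFind lst (i + 1)
  else none
termination_by lst.length - i

-- termination helper for solution_alt: a found index leaves room for the 4 removed elements
theorem pvFind_le {lst : List Int} {k j : Nat} (h : pvFind lst k = some j) :
    j + 4 ≤ lst.length := by
  fun_induction pvFind lst k with
  | case1 k hle hpat => simp_all
  | case2 k hle hpat ih => exact ih h
  | case3 k hle => simp_all

-- B's outer `while True` loop: remove the leftmost occurrence (del lst[i:i+4]), count, restart.
def solution_alt (lst : List Int) : Int :=
  match h : pvFind lst 0 with
  | none => 0
  | some i => 1 + solution_alt (lst.take i ++ lst.drop (i + 4))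
termination_by lst.length
decreasing_by
  have h4 := pvFind_le h
  simp only [List.length_append, List.length_take, List.length_drop]
  omega

-- ===== PRECONDITION & SPEC =====
def Spec_solution (ingredient : List Int) (out : Int) : Prop := out = solution_alt ingredient
instance (ingredient : List Int) (out : Int) : Decidable (Spec_solution ingredient out) := by unfold Spec_solution; infer_instance

-- ===== CLAIM (what is proved, stated in full; the proofs are below) =====
def Claim_equal_solution : Prop := ∀ (ingredient : List Int), Dom_solution ingredient → Spec_solution ingredient (solution ingredient)

-- ===== LEMMAS AND PROOFS =====

-- an occurrence of the pattern fits inside the list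
theorem occ_len (l : List Int) (i : Nat) (h : (l.drop i).take 4 = [1, 2, 3, 1]) :
    i + 4 ≤ l.length := by
  have h1 := congrArg List.length h
  simp at h1
  omega

-- a list starting with the pattern splits off the pattern
theorem occ_head (l : List Int) (h : l.take 4 = [1, 2, 3, 1]) :
    l = [1, 2, 3, 1] ++ l.drop 4 := by
  conv_lhs => rw [← List.take_append_drop 4 l]
  rw [h]

-- occurrences survive appending on the right
theorem occ_append (q r : List Int) (i : Nat) (h : (q.drop i).take 4 = [1, 2, 3, 1]) :
    ((q ++ r).drop i).take 4 = [1, 2, 3, 1] := by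
  have hle := occ_len q i h
  rw [List.drop_append_of_le_length (by omega), occ_head _ h, List.append_assoc,
    List.take_append_of_le_length (by simp)]
  rfl

-- A's step in drop/take form
theorem stepA_eq (s : List Int) (c : Int) (x : Int) :
    pvStepA (s, c) x =
      if (s ++ [x]).drop (s.length + 1 - 4) = [1, 2, 3, 1] then
        ((s ++ [x]).take (s.length + 1 - 4), c + 1)
      else (s ++ [x], c) := by
  simp only [pvStepA,
    PySem.List.slice_from_neg_ofNat (s ++ [x]) 4 (by omega),
    PySem.List.slice_to_neg_ofNat (s ++ [x]) 4 (by omega),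
    List.length_append, List.length_cons, List.length_nil]

-- over a pattern-free prefix A's stack just copies the input
theorem foldA_noOcc (p : List Int) (h : ∀ i, (p.drop i).take 4 ≠ [1, 2, 3, 1]) :
    p.foldl pvStepA ([], 0) = (p, 0) := by
  induction p using List.reverseRecOn with
  | nil => simp
  | append_singleton q x ih =>
    have hq : ∀ i, (q.drop i).take 4 ≠ [1, 2, 3, 1] := fun i hcon => h i (occ_append q [x] i hcon)
    rw [List.foldl_append, ih hq, List.foldl_cons, List.foldl_nil, stepA_eq]
    split
    · next hcond =>
      exfalso
      by_cases h4 : 4 ≤ q.length + 1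
      · exact h (q.length + 1 - 4) (by
          rw [List.take_of_length_le (by simp; omega)]
          exact hcond)
      · have := congrArg List.length hcond
        simp at this
        omega
    · rfl

-- the count component of A's fold is affine in the starting count, stack independent of it
theorem foldA_cnt (v : List Int) : ∀ (s : List Int) (c : Int),
    v.foldl pvStepA (s, c) = ((v.foldl pvStepA (s, 0)).1, c + (v.foldl pvStepA (s, 0)).2) := by
  induction v with
  | nil => simp
  | cons x v ih =>
    intro s c
    have hstep : pvStepA (s, c) x = ((pvStepA (s, 0) x).1, c + (pvStepA (s, 0) x).2) := by
      simp only [pvStepA]; split_ifs <;> simp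
    simp only [List.foldl_cons, hstep]
    cases hsc : pvStepA (s, 0) x with
    | mk s' c' => rw [ih s' (c + c'), ih s' c']; simp [add_assoc]

-- pvFind returning none means no occurrence at or after k
theorem pvFind_none_spec (lst : List Int) (k : Nat) (h : pvFind lst k = none) :
    ∀ i, k ≤ i → (lst.drop i).take 4 ≠ [1, 2, 3, 1] := by
  fun_induction pvFind lst k with
  | case1 k hle hpat => simp_all
  | case2 k hle hpat ih =>
    intro i hki hcon
    rcases Nat.eq_or_lt_of_le hki with rfl | hlt
    · exact hpat hcon
    · exact ih h i hlt hcon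
  | case3 k hle =>
    intro i hki hcon
    have := occ_len lst i hcon
    omega

-- pvFind returning some j means j is the leftmost occurrence at or after k
theorem pvFind_some_spec (lst : List Int) (k : Nat) (j : Nat) (h : pvFind lst k = some j) :
    (lst.drop j).take 4 = [1, 2, 3, 1] ∧
      ∀ i, i < j → (lst.drop i).take 4 ≠ [1, 2, 3, 1] ∨ i < k := by
  fun_induction pvFind lst k with
  | case1 k hle hpat =>
    simp only [Option.some.injEq] at h
    subst h
    exact ⟨hpat, fun i hij => Or.inr hij⟩
  | case2 k hle hpat ih =>
    obtain ⟨h1, h2⟩ := ih h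
    refine ⟨h1, fun i hij => ?_⟩
    rcases h2 i hij with hno | hik
    · exact Or.inl hno
    · rcases Nat.lt_succ_iff_lt_or_eq.mp hik with hik' | rfl
      · exact Or.inr hik'
      · exact Or.inl hpat
  | case3 k hle => simp_all

-- main equivalence, by strong induction on the length of the input
theorem main_aux (xs : List Int) : solution xs = solution_alt xs := by
  suffices H : ∀ n (xs : List Int), xs.length = n → solution xs = solution_alt xs from H _ xs rfl
  intro n
  induction n using Nat.strong_induction_on with
  | _ n ih =>
    intro xs hlen
    cases h : pvFind xs 0 with
    | none =>
      have hno : ∀ i, (xs.drop i).take 4 ≠ [1, 2, 3, 1] :=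
        fun i => pvFind_none_spec xs 0 h i (Nat.zero_le i)
      rw [solution_alt]
      split
      · simp [solution, foldA_noOcc xs hno]
      · next j heq => rw [h] at heq; cases heq
    | some i =>
      obtain ⟨hocc, hmin'⟩ := pvFind_some_spec xs 0 i h
      have hmin : ∀ j, j < i → (xs.drop j).take 4 ≠ [1, 2, 3, 1] := by
        intro j hj
        rcases hmin' j hj with hno | hk
        · exact hno
        · omega
      have hlen4 : i + 4 ≤ xs.length := occ_len xs i hocc
      set u := xs.take i with hu_def
      set v := xs.drop (i + 4) with hv_def
      have hulen : u.length = i := by simp [hu_def]; omega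
      have hxsplit : xs = (u ++ [1, 2, 3]) ++ ([1] ++ v) := by
        conv_lhs => rw [← List.take_append_drop i xs]
        have : xs.drop i = [1, 2, 3, 1] ++ xs.drop (i + 4) := by
          rw [occ_head _ hocc, List.drop_drop]
        rw [this]
        simp [← hu_def, ← hv_def]
      -- the prefix u ++ [1,2,3] is pattern-free (any occurrence there would start before i)
      have hpre : ∀ j, ((u ++ [1, 2, 3]).drop j).take 4 ≠ [1, 2, 3, 1] := by
        intro j hcon
        have hj4 := occ_len _ _ hcon
        simp [hulen] at hj4
        apply hmin j (by omega)
        rw [hxsplit]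
        exact occ_append _ _ _ hcon
      have hu : ∀ j, (u.drop j).take 4 ≠ [1, 2, 3, 1] := by
        intro j hcon
        have hj4 := occ_len _ _ hcon
        apply hmin j (by omega)
        rw [hxsplit, List.append_assoc]
        exact occ_append _ _ _ hcon
      -- A's fold on xs: copy u ++ [1,2,3], pop on the 1, continue over v with count 1
      have hstep1 : pvStepA (u ++ [1, 2, 3], 0) 1 = (u, 1) := by
        rw [stepA_eq]
        have hlen' : (u ++ [1, 2, 3]).length + 1 - 4 = u.length := by simp
        rw [hlen', List.append_assoc]
        have hdrop : (u ++ ([1, 2, 3] ++ [1])).drop u.length = [1, 2, 3, 1] := by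
          simp
        have htake : (u ++ ([1, 2, 3] ++ [1])).take u.length = u := by
          simp
        rw [hdrop, htake]
        simp
      have hA : solution xs = 1 + solution (u ++ v) := by
        rw [show solution xs = ((((u ++ [1, 2, 3]) ++ ([1] ++ v)).foldl pvStepA ([], 0)).2) from by rw [← hxsplit]; rfl]
        rw [List.foldl_append, foldA_noOcc _ hpre, List.singleton_append, List.foldl_cons, hstep1]
        rw [show solution (u ++ v) = (((u ++ v).foldl pvStepA ([], 0)).2) from rfl]
        rw [List.foldl_append, foldA_noOcc _ hu]
        rw [foldA_cnt v u 1]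
      -- B removes exactly u's complement: xs.take i ++ xs.drop (i+4) = u ++ v
      have hB : solution_alt xs = 1 + solution_alt (u ++ v) := by
        rw [solution_alt]
        split
        · next heq => rw [h] at heq; cases heq
        · next j heq =>
            rw [h] at heq
            injection heq with heq'
            subst heq'
            rfl
      rw [hA, hB]
      congr 1
      exact ih ((u ++ v).length) (by simp [hulen, hv_def]; omega) (u ++ v) rfl

-- ===== VERDICT (by name: the statement is the Claim_ definition above) =====
theorem solution_spec : Claim_equal_solution := by
  intro xs _
  show solution xs = solution_alt xs
  exact main_aux xs
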